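-- pv_equiv track=rewrite | github.com/colinboumenot/AdventOfCode2024 | Solutions/Day22.py | get_2000
-- ===== SOURCE A (Python) =====
-- def get_2000(secret):
--     modulo = 16777216
--     answer = []
--     for _ in range(2000):
--         secret = (secret ^ (secret * 64)) % modulo
--         secret = (secret ^ (secret // 32)) % modulo
--         secret = (secret ^ (secret * 2048)) % modulo
--         answer.append(secret)
--     return answer
-- ===== SOURCE B (Python) =====
-- def get_2000(secret):
--     M = 0xFFFFFF
--     def f(s):
--         s = (s ^ (s << 6)) & M
--         s = s ^ (s >> 5)
--         s = (s ^ (s << 11)) & M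
--         return s
--     basis = [f(1 << i) for i in range(24)]
--     out = []
--     s = secret & M
--     for _ in range(2000):
--         t = 0
--         b = s
--         for v in basis:
--             if b & 1:
--                 t ^= v
--             b >>= 1
--         s = t
--         out.append(s)
--     return out
-- ===== Notes on version B (the rewrite author's own statement) =====
-- stated objective: alternative
-- what changed: The round function is linear over GF(2), so B precomputes its images on the single-bit basis states once and then produces each successive secret as the xor of those precomputed basis images at the set bits of the current state, instead of re-doing A's xor/mul/div/mod arithmetic every step.
import Mathlib
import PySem

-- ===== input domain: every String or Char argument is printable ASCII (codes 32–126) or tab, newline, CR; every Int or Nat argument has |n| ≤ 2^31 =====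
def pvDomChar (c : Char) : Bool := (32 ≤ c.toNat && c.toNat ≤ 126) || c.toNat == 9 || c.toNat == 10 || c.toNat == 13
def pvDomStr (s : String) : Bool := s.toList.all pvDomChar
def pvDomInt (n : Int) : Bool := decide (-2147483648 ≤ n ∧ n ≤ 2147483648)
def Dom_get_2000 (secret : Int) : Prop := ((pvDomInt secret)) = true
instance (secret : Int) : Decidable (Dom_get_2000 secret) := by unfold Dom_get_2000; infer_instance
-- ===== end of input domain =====

-- B replaces A's per-step xor/mul/div/mod arithmetic by a different algorithm: the
-- round function is linear over GF(2), so B precomputes its images on the single-bit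
-- basis states once and produces each successive secret as the xor of those basis
-- images at the set bits of the current state (objective: alternative).

-- ===== PORT A =====
def get_2000 (secret : Int) : List Int :=
  ((PySem.List.pyRange 0 2000 1).foldl (fun (st : Int × List Int) _ =>
      let s1 := PySem.Int.mod (PySem.Int.bxor st.1 (st.1 * 64)) 16777216
      let s2 := PySem.Int.mod (PySem.Int.bxor s1 (PySem.Int.floordiv s1 32)) 16777216
      let s3 := PySem.Int.mod (PySem.Int.bxor s2 (s2 * 2048)) 16777216
      (s3, st.2 ++ [s3])) (secret, [])).2

-- ===== PORT B =====
-- f from Source B (shift/mask form of the round function)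
def pvF (s : Int) : Int :=
  let s1 := PySem.Int.band (PySem.Int.bxor s (s <<< (6:Nat))) 16777215
  let s2 := PySem.Int.bxor s1 (s1 >>> (5:Nat))
  PySem.Int.band (PySem.Int.bxor s2 (s2 <<< (11:Nat))) 16777215

-- basis = [f(1 << i) for i in range(24)]
def pvBasis : List Int := (PySem.List.pyRange 0 24 1).map (fun i => pvF ((1:Int) <<< i.toNat))

-- the inner `for v in basis` loop of Source B, carrying (t, b)
def pvApply (basis : List Int) (s : Int) : Int :=
  (basis.foldl (fun (tb : Int × Int) v =>
      (if PySem.Int.band tb.2 1 ≠ 0 then PySem.Int.bxor tb.1 v else tb.1, tb.2 >>> (1:Nat)))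
    ((0:Int), s)).1

def get_2000_alt (secret : Int) : List Int :=
  ((PySem.List.pyRange 0 2000 1).foldl (fun (st : Int × List Int) _ =>
      let t := pvApply pvBasis st.1
      (t, st.2 ++ [t])) (PySem.Int.band secret 16777215, [])).2

-- ===== PRECONDITION & SPEC =====
def Spec_get_2000 (secret : Int) (out : List Int) : Prop := out = get_2000_alt secret
instance (secret : Int) (out : List Int) : Decidable (Spec_get_2000 secret out) := by unfold Spec_get_2000; infer_instance

-- ===== CLAIM (what is proved, stated in full; the proofs are below) =====
def Claim_equal_get_2000 : Prop := ∀ (secret : Int), Dom_get_2000 secret → Spec_get_2000 secret (get_2000 secret)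

-- ===== LEMMAS AND PROOFS =====

-- Nat model of the round function (three GF(2)-linear stages)
def ng1 (n : Nat) : Nat := (n ^^^ n <<< 6) % 16777216
def ng2 (n : Nat) : Nat := n ^^^ n >>> 5
def ng3 (n : Nat) : Nat := (n ^^^ n <<< 11) % 16777216
def nF (n : Nat) : Nat := ng3 (ng2 (ng1 n))

-- A's loop body, named (definitionally equal to the lambda in get_2000)
def aStep (x : Int) : Int :=
  let s1 := PySem.Int.mod (PySem.Int.bxor x (x * 64)) 16777216
  let s2 := PySem.Int.mod (PySem.Int.bxor s1 (PySem.Int.floordiv s1 32)) 16777216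
  PySem.Int.mod (PySem.Int.bxor s2 (s2 * 2048)) 16777216

-- Nat model of the inner bit loop
def nApply (ws : List Nat) (t b : Nat) : Nat :=
  (ws.foldl (fun (tb : Nat × Nat) w =>
      (if tb.2 &&& 1 ≠ 0 then tb.1 ^^^ w else tb.1, tb.2 >>> 1)) (t, b)).1

theorem basis_eq :
    pvBasis = ((List.range 24).map (fun i => nF (2 ^ i))).map (fun w => ((w : Nat) : Int)) := by
  decide

theorem apply_fold (ws : List Nat) : ∀ (t b : Nat),
    ((ws.map (fun w => ((w : Nat) : Int))).foldl (fun (tb : Int × Int) v =>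
      (if PySem.Int.band tb.2 1 ≠ 0 then PySem.Int.bxor tb.1 v else tb.1, tb.2 >>> (1:Nat)))
      (((t:Nat):Int), ((b:Nat):Int)))
    = (((nApply ws t b : Nat) : Int),
       (((ws.foldl (fun (tb : Nat × Nat) w =>
          (if tb.2 &&& 1 ≠ 0 then tb.1 ^^^ w else tb.1, tb.2 >>> 1)) (t, b)).2 : Nat) : Int)) := by
  induction ws with
  | nil => intro t b; simp [nApply]
  | cons w ws ih =>
    intro t b
    simp only [List.map_cons, List.foldl_cons, nApply] at *
    have hband : PySem.Int.band ((b:Nat):Int) 1 = ((b &&& 1 : Nat) : Int) := by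
      rw [show ((1:Int)) = ((1:Nat):Int) by norm_num, PySem.Int.band_natCast]
    have hshr : (((b:Nat):Int)) >>> (1:Nat) = ((b >>> 1 : Nat) : Int) := (Int.natCast_shiftRight b 1).symm
    rw [hband, hshr]
    by_cases h : b &&& 1 ≠ 0
    · rw [if_pos (by exact_mod_cast h), if_pos h, PySem.Int.bxor_natCast, ih]
    · have h0 : b &&& 1 = 0 := not_not.mp h
      rw [if_neg (by simp [h0]), if_neg h, ih]

theorem sub_mask : ∀ (w k : Nat), k < 2 ^ w → (2 ^ w - 1) ^^^ k = 2 ^ w - 1 - k := by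
  intro w
  induction w with
  | zero => intro k h; interval_cases k; rfl
  | succ w ih =>
    intro k h
    have hp : 0 < 2 ^ w := Nat.two_pow_pos w
    have hbit : Nat.bit (k.testBit 0) (k >>> 1) = k := Nat.bit_testBit_zero_shiftRight_one k
    have hmask : (2 ^ (w+1) - 1) = Nat.bit true (2 ^ w - 1) := by
      simp [Nat.bit]; omega
    have hk2 : k >>> 1 < 2 ^ w := by
      rw [Nat.shiftRight_one]; omega
    calc (2 ^ (w+1) - 1) ^^^ k
        = Nat.bit true (2 ^ w - 1) ^^^ Nat.bit (k.testBit 0) (k >>> 1) := by rw [hmask, hbit]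
      _ = Nat.bit (true != k.testBit 0) ((2 ^ w - 1) ^^^ (k >>> 1)) := Nat.xor_bit _ _ _ _
      _ = Nat.bit (!k.testBit 0) (2 ^ w - 1 - k >>> 1) := by rw [ih _ hk2]; cases k.testBit 0 <;> rfl
      _ = 2 ^ (w+1) - 1 - k := by
          have hk : k = 2 * (k >>> 1) + (if k.testBit 0 then 1 else 0) := by
            conv_lhs => rw [← hbit]
            cases k.testBit 0 <;> simp [Nat.bit]
          cases hb : k.testBit 0 <;> simp [hb] at hk <;> simp [Nat.bit] <;> omega

theorem bit_split (b o : Nat) :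
    b <<< o = (b >>> 1) <<< (o + 1) ^^^ (b &&& 1) <<< o := by
  apply Nat.eq_of_testBit_eq
  intro i
  simp only [Nat.testBit_xor, Nat.testBit_shiftLeft, Nat.testBit_shiftRight, Nat.testBit_and,
    ge_iff_le]
  have h1 : ∀ j : Nat, (1:Nat).testBit j = decide (j = 0) := by
    intro j; cases j <;> simp [Nat.testBit_succ]
  by_cases ho : o ≤ i
  · by_cases ho1 : o + 1 ≤ i
    · have : 1 + (i - (o+1)) = i - o := by omega
      simp [ho, ho1, this, h1, show ¬ (i - o = 0) by omega]
    · have : i = o := by omega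
      subst this
      simp [ho1, h1]
  · simp [ho, show ¬ (o + 1 ≤ i) by omega]

theorem lin1 (a b : Nat) : ng1 (a ^^^ b) = ng1 a ^^^ ng1 b := by
  unfold ng1
  apply Nat.eq_of_testBit_eq
  intro i
  rw [show (16777216:Nat) = 2 ^ 24 by norm_num]
  simp only [Nat.testBit_mod_two_pow, Nat.testBit_xor, Nat.testBit_shiftLeft, ge_iff_le]
  by_cases h24 : i < 24 <;> by_cases h6 : 6 ≤ i <;>
    simp [h24, h6] <;>
    cases a.testBit i <;> cases b.testBit i <;>
    cases a.testBit (i-6) <;> cases b.testBit (i-6) <;> rfl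

theorem lin2 (a b : Nat) : ng2 (a ^^^ b) = ng2 a ^^^ ng2 b := by
  unfold ng2
  apply Nat.eq_of_testBit_eq
  intro i
  simp only [Nat.testBit_xor, Nat.testBit_shiftRight]
  cases a.testBit i <;> cases b.testBit i <;>
    cases a.testBit (5+i) <;> cases b.testBit (5+i) <;> rfl

theorem lin3 (a b : Nat) : ng3 (a ^^^ b) = ng3 a ^^^ ng3 b := by
  unfold ng3
  apply Nat.eq_of_testBit_eq
  intro i
  rw [show (16777216:Nat) = 2 ^ 24 by norm_num]
  simp only [Nat.testBit_mod_two_pow, Nat.testBit_xor, Nat.testBit_shiftLeft, ge_iff_le]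
  by_cases h24 : i < 24 <;> by_cases h11 : 11 ≤ i <;>
    simp [h24, h11] <;>
    cases a.testBit i <;> cases b.testBit i <;>
    cases a.testBit (i-11) <;> cases b.testBit (i-11) <;> rfl

theorem nF_linear (a b : Nat) : nF (a ^^^ b) = nF a ^^^ nF b := by
  unfold nF; rw [lin1, lin2, lin3]

theorem nF_zero : nF 0 = 0 := by decide

theorem nApply_spec : ∀ (j o t b : Nat), b < 2 ^ j →
    nApply ((List.range j).map (fun i => nF (2 ^ (o + i)))) t b = t ^^^ nF (b <<< o) := by
  intro j
  induction j with
  | zero =>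
    intro o t b h
    interval_cases b
    simp [nApply, nF_zero]
  | succ j ih =>
    intro o t b h
    rw [List.range_succ_eq_map]
    simp only [List.map_cons, List.map_map, nApply, List.foldl_cons]
    have hcomp : ((fun i => nF (2 ^ (o + i))) ∘ Nat.succ) = (fun i => nF (2 ^ (o + 1 + i))) := by
      funext i
      simp only [Function.comp]
      congr 2
      omega
    rw [hcomp]
    have hb2 : b >>> 1 < 2 ^ j := by
      rw [Nat.shiftRight_one]
      have := Nat.pow_succ 2 j
      omega
    have hsplit := bit_split b o
    by_cases hbit : b &&& 1 ≠ 0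
    · have h1 : b &&& 1 = 1 := by
        rw [Nat.and_one_is_mod] at *; omega
      rw [if_pos hbit]
      have := ih (o+1) (t ^^^ nF (2 ^ (o + 0))) (b >>> 1) hb2
      unfold nApply at this
      rw [this, hsplit, nF_linear, h1, Nat.one_shiftLeft]
      simp only [Nat.add_zero]
      rw [Nat.xor_assoc, Nat.xor_comm (nF (2^o)) _]
    · have h0 : b &&& 1 = 0 := not_not.mp hbit
      rw [if_neg hbit]
      have := ih (o+1) t (b >>> 1) hb2
      unfold nApply at this
      rw [this, hsplit, nF_linear, h0]
      simp [nF_zero]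

theorem n1_mod (n : Nat) :
    (n ^^^ n * 64) % 16777216 = ng1 (n % 16777216) := by
  unfold ng1
  rw [show (n * 64) = n <<< 6 by rw [Nat.shiftLeft_eq]]
  apply Nat.eq_of_testBit_eq
  intro i
  rw [show (16777216:Nat) = 2 ^ 24 by norm_num]
  simp only [Nat.testBit_mod_two_pow, Nat.testBit_xor, Nat.testBit_shiftLeft, ge_iff_le]
  by_cases h24 : i < 24
  · by_cases h6 : 6 ≤ i
    · have h : i - 6 < 24 := by omega
      simp [h24, h6, h]
    · simp [h24, h6]
  · simp [h24]

theorem n1_neg (m : Nat) :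
    (m ^^^ (2 ^ 6 * m + 63)) % 16777216 = ng1 (16777215 - m % 16777216) := by
  have hmlt : m % 16777216 < 2 ^ 24 := by
    have := Nat.mod_lt m (show 0 < 16777216 by norm_num); omega
  have hr : 16777215 - m % 16777216 = (2 ^ 24 - 1) ^^^ (m % 16777216) := by
    rw [sub_mask 24 _ hmlt]; norm_num
  rw [hr]
  unfold ng1
  apply Nat.eq_of_testBit_eq
  intro i
  rw [show (16777216:Nat) = 2 ^ 24 by norm_num]
  have h63 : ∀ j, (63:Nat).testBit j = decide (j < 6) := by
    intro j
    rw [show (63:Nat) = 2 ^ 6 - 1 by norm_num, Nat.testBit_two_pow_sub_one]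
  simp only [Nat.testBit_mod_two_pow, Nat.testBit_xor, Nat.testBit_shiftLeft,
    Nat.testBit_two_pow_mul_add m (show (63:Nat) < 2 ^ 6 by norm_num),
    Nat.testBit_two_pow_sub_one, h63, ge_iff_le]
  by_cases h24 : i < 24
  · by_cases h6 : 6 ≤ i
    · have h1 : i - 6 < 24 := by omega
      have h2 : ¬ (i < 6) := by omega
      simp only [h24, h6, h1, h2, decide_true, decide_false, if_false, Bool.true_and]
      cases m.testBit i <;> cases m.testBit (i - 6) <;> rfl
    · have h2 : i < 6 := by omega
      simp only [h24, h6, h2, decide_true, decide_false, Bool.true_and, Bool.false_and]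
      cases m.testBit i <;> rfl
  · simp [h24]

theorem mod_neg_val (m : Nat) :
    PySem.Int.mod (-(m:Int) - 1) 16777216 = ((16777215 - m % 16777216 : Nat) : Int) := by
  rw [PySem.Int.mod_eq_emod_of_pos (by norm_num)]
  have hlt : m % 16777216 < 16777216 := Nat.mod_lt _ (by norm_num)
  have hm : ((m % 16777216 : Nat) : Int) = (m : Int) % 16777216 := by push_cast; rfl
  omega

theorem s1_lemma (x : Int) :
    PySem.Int.mod (PySem.Int.bxor x (x * 64)) 16777216
      = ((ng1 (PySem.Int.mod x 16777216).toNat : Nat) : Int) := by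
  rcases le_or_gt 0 x with hx | hx
  · obtain ⟨n, rfl⟩ := Int.eq_ofNat_of_zero_le hx
    have h64 : ((n:Int) * 64) = ((n * 64 : Nat) : Int) := by push_cast; ring
    rw [h64, PySem.Int.bxor_natCast,
        show ((16777216:Int)) = ((16777216:Nat):Int) by norm_num,
        PySem.Int.mod_natCast, PySem.Int.mod_natCast, n1_mod, Int.toNat_natCast]
  · obtain ⟨m, rfl⟩ : ∃ m : Nat, x = -(m:Int) - 1 := ⟨(-x-1).toNat, by omega⟩
    have hneg : PySem.Int.bxor (-(m:Int) - 1) ((-(m:Int) - 1) * 64)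
        = ((m ^^^ (2 ^ 6 * m + 63) : Nat) : Int) := by
      unfold PySem.Int.bxor
      rw [if_neg (by omega), if_neg (by nlinarith [show (0:Int) ≤ m from Int.natCast_nonneg m])]
      congr 1
      congr 1
      · omega
      · have : (-((-(m:Int) - 1) * 64) - 1) = ((2 ^ 6 * m + 63 : Nat) : Int) := by push_cast; ring
        rw [this, Int.toNat_natCast]
    rw [mod_neg_val, Int.toNat_natCast, hneg,
        show ((16777216:Int)) = ((16777216:Nat):Int) by norm_num,
        PySem.Int.mod_natCast, n1_neg]

theorem ng1_lt (n : Nat) : ng1 n < 16777216 := Nat.mod_lt _ (by norm_num)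
theorem nF_lt (n : Nat) : nF n < 16777216 := Nat.mod_lt _ (by norm_num)

theorem s2_lemma (a : Nat) (h : a < 16777216) :
    PySem.Int.mod (PySem.Int.bxor ((a:Nat):Int) (PySem.Int.floordiv ((a:Nat):Int) 32)) 16777216
      = ((ng2 a : Nat) : Int) := by
  rw [show ((32:Int)) = ((32:Nat):Int) by norm_num, PySem.Int.floordiv_natCast,
      PySem.Int.bxor_natCast,
      show ((16777216:Int)) = ((16777216:Nat):Int) by norm_num, PySem.Int.mod_natCast]
  have hdiv : a / 32 = a >>> 5 := by rw [Nat.shiftRight_eq_div_pow]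
  have hlt : a ^^^ a / 32 < 16777216 := by
    have h1 : a / 32 < 16777216 := lt_of_le_of_lt (Nat.div_le_self a 32) h
    rw [show (16777216:Nat) = 2 ^ 24 by norm_num] at *
    exact Nat.xor_lt_two_pow h h1
  rw [Nat.mod_eq_of_lt hlt, hdiv]
  rfl

theorem s3_lemma (b : Nat) :
    PySem.Int.mod (PySem.Int.bxor ((b:Nat):Int) (((b:Nat):Int) * 2048)) 16777216
      = ((ng3 b : Nat) : Int) := by
  have h2048 : ((b:Int) * 2048) = ((b * 2048 : Nat) : Int) := by push_cast; ring
  rw [h2048, PySem.Int.bxor_natCast,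
      show ((16777216:Int)) = ((16777216:Nat):Int) by norm_num, PySem.Int.mod_natCast,
      show (b * 2048) = b <<< 11 by rw [Nat.shiftLeft_eq]]
  rfl

theorem band_mask_eq (x : Int) :
    PySem.Int.band x 16777215 = PySem.Int.mod x 16777216 := by
  rcases le_or_gt 0 x with hx | hx
  · obtain ⟨n, rfl⟩ := Int.eq_ofNat_of_zero_le hx
    rw [show ((16777215:Int)) = ((16777215:Nat):Int) by norm_num,
        show ((16777216:Int)) = ((16777216:Nat):Int) by norm_num,
        PySem.Int.band_natCast, PySem.Int.mod_natCast,
        Nat.and_two_pow_sub_one_eq_mod n 24]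
  · obtain ⟨m, rfl⟩ : ∃ m : Nat, x = -(m:Int) - 1 := ⟨(-x-1).toNat, by omega⟩
    unfold PySem.Int.band
    rw [if_neg (by omega), if_pos (by norm_num)]
    have h1 : ((16777215:Int)).toNat = 16777215 := rfl
    have h2 : (-(-(m:Int) - 1) - 1).toNat = m := by omega
    rw [h1, h2, Nat.and_comm, Nat.and_two_pow_sub_one_eq_mod m 24, mod_neg_val]

theorem aStep_eq (x : Int) :
    aStep x = ((nF (PySem.Int.band x 16777215).toNat : Nat) : Int) := by
  unfold aStep nF
  rw [band_mask_eq]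
  simp only [s1_lemma x, s2_lemma _ (ng1_lt _), s3_lemma]

theorem apply_cast0 (ws : List Nat) (b : Nat) :
    pvApply (ws.map (fun w => ((w : Nat) : Int))) ((b : Nat) : Int)
      = ((nApply ws 0 b : Nat) : Int) := by
  unfold pvApply
  have h := apply_fold ws 0 b
  have h0 : (((0:Nat):Int)) = (0:Int) := rfl
  rw [h0] at h
  rw [h]

theorem bStep_eq (n : Nat) (h : n < 16777216) :
    pvApply pvBasis ((n : Nat) : Int) = ((nF n : Nat) : Int) := by
  rw [basis_eq, apply_cast0]
  have hws : ((List.range 24).map (fun i => nF (2 ^ i)))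
      = ((List.range 24).map (fun i => nF (2 ^ (0 + i)))) := by
    simp
  rw [hws, nApply_spec 24 0 0 n (by norm_num at h ⊢; omega)]
  simp

theorem fold_eq (l : List Int) : ∀ (x : Int) (acc : List Int),
    (l.foldl (fun (st : Int × List Int) _ => (aStep st.1, st.2 ++ [aStep st.1])) (x, acc)).2
    = (l.foldl (fun (st : Int × List Int) _ =>
        (pvApply pvBasis st.1, st.2 ++ [pvApply pvBasis st.1])) (PySem.Int.band x 16777215, acc)).2 := by
  induction l with
  | nil => intro x acc; rfl
  | cons c l ih =>
    intro x acc
    simp only [List.foldl_cons]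
    have hmodpos : (0:Int) < 16777216 := by norm_num
    have hnn : 0 ≤ PySem.Int.mod x 16777216 := PySem.Int.mod_nonneg x hmodpos
    have hlt : PySem.Int.mod x 16777216 < 16777216 := PySem.Int.mod_lt x hmodpos
    set rn := (PySem.Int.mod x 16777216).toNat with hrn
    have hband : PySem.Int.band x 16777215 = ((rn : Nat) : Int) := by
      rw [band_mask_eq, hrn, Int.toNat_of_nonneg hnn]
    have hrnlt : rn < 16777216 := by omega
    have hA : aStep x = ((nF rn : Nat) : Int) := by
      rw [aStep_eq, band_mask_eq]
    have hB : pvApply pvBasis (PySem.Int.band x 16777215) = ((nF rn : Nat) : Int) := by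
      rw [hband, bStep_eq rn hrnlt]
    rw [hA, hB, ih]
    have hfix : PySem.Int.band ((nF rn : Nat) : Int) 16777215 = ((nF rn : Nat) : Int) := by
      rw [band_mask_eq, show ((16777216:Int)) = ((16777216:Nat):Int) by norm_num,
          PySem.Int.mod_natCast, Nat.mod_eq_of_lt (nF_lt rn)]
    rw [hfix]

-- ===== VERDICT (by name: the statement is the Claim_ definition above) =====
theorem get_2000_spec : Claim_equal_get_2000 := by
  intro secret _
  unfold Spec_get_2000
  show (get_2000 secret) = get_2000_alt secret
  unfold get_2000 get_2000_alt
  exact fold_eq (PySem.List.pyRange 0 2000 1) secret []
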